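-- pv_equiv track=rewrite | github.com/codeflash-ai/codeflash | code_to_optimize/crosshair_tests.py | find_common_tags2_8
-- ===== SOURCE A (Python) =====
-- def find_common_tags2_8(articles: list[dict[str, list[str]]]) -> set[str]:
--     if not articles:
--         return set()
--
--     # Initialize with the first article's tags (raises KeyError if "tags" is missing)
--     try:
--         common_tags = set(articles[0]["tags"])
--     except KeyError:
--         raise KeyError("The first article is missing the 'tags' key.")
--
--     for index, article in enumerate(articles[1:], start=2):
--         try:
--             tags = article["tags"]
--         except KeyError:
--             raise KeyError(f"Article at position {index} is missing the 'tags' key.")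
--
--         # Perform intersection with the current article's tags
--         common_tags.intersection_update(tags)
--
--     return common_tags
-- ===== SOURCE B (Python) =====
-- def find_common_tags2_8(articles: list[dict[str, list[str]]]) -> set[str]:
--     if not articles:
--         return set()
--
--     counts: dict[str, int] = {}
--     for i, article in enumerate(articles):
--         try:
--             tags = article["tags"]
--         except KeyError:
--             if i == 0:
--                 raise KeyError("The first article is missing the 'tags' key.")
--             raise KeyError(f"Article at position {i + 1} is missing the 'tags' key.")
--         # count each distinct tag once per article (first-occurrence order)
--         for t in dict.fromkeys(tags):
--             counts[t] = counts.get(t, 0) + 1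
--
--     n = len(articles)
--     return {t for t, c in counts.items() if c == n}
-- ===== Notes on version B (the rewrite author's own statement) =====
-- stated objective: alternative
-- what changed: Replaces A's iterated set-intersection updates with a single counting pass: a dict counts each distinct tag once per article, and the result is the tags whose count equals the number of articles.
import Mathlib
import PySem

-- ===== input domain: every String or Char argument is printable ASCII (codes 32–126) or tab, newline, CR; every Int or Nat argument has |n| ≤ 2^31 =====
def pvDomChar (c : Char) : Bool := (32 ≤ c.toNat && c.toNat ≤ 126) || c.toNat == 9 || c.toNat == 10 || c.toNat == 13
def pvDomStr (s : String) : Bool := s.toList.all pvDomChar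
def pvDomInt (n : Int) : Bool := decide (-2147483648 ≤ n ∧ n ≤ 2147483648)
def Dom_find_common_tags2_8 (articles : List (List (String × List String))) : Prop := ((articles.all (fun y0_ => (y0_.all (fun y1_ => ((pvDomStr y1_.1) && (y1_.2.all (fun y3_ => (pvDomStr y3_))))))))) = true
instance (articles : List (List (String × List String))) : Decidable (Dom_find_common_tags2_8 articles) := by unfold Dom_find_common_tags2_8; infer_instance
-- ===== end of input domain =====

-- B replaces A's repeated set-intersection updates with a single pass that counts each
-- distinct tag once per article in a dict, then keeps the tags counted in every article
-- (objective: alternative decomposition; same asymptotic cost).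

-- ===== PORT A =====
-- article["tags"]; the `[]` default can only fire outside Pre_ (Python raises KeyError there)
def pvTags (a : List (String × List String)) : List String :=
  PySem.Dict.getD (PySem.Dict.mk a) "tags" []

def find_common_tags2_8 (articles : List (List (String × List String))) : List String :=
  match articles with
  | [] => []
  | a0 :: rest =>
    -- common_tags = set(articles[0]["tags"]); for article in articles[1:]: common_tags.intersection_update(article["tags"])
    rest.foldl (fun common article => PySem.Set.inter common (pvTags article))
      (PySem.Set.ofList (pvTags a0))

-- ===== PORT B =====
def find_common_tags2_8_alt (articles : List (List (String × List String))) : List String :=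
  if articles.isEmpty then []
  else
    -- counts[t] = counts.get(t, 0) + 1 for each t in dict.fromkeys(article["tags"])
    let counts : PySem.Dict String Int :=
      articles.foldl
        (fun d article =>
          (PySem.List.dedup (pvTags article)).foldl
            (fun d t => d.modify t 0 (· + 1)) d)
        PySem.Dict.empty
    -- {t for t, c in counts.items() if c == n}
    ((counts.items.filter (fun p => p.2 == (articles.length : Int))).map Prod.fst)

-- ===== PRECONDITION & SPEC =====
-- Pre_ excludes exactly the inputs where some article lacks the "tags" key: Python A
-- raises KeyError there (and Python B raises the same KeyError).
def Pre_find_common_tags2_8 (articles : List (List (String × List String))) : Prop :=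
  (articles.all (fun a => (PySem.Dict.mk a).contains "tags")) = true
instance (articles : List (List (String × List String))) : Decidable (Pre_find_common_tags2_8 articles) := by unfold Pre_find_common_tags2_8; infer_instance

def pvWitness_find_common_tags2_8 : (List (List (String × List String))) :=
  [[("tags", ["a", "b"])], [("title", ["x"]), ("tags", ["b", "a", "b"])]]

def Spec_find_common_tags2_8 (articles : List (List (String × List String))) (out : List String) : Prop := out = find_common_tags2_8_alt articles
instance (articles : List (List (String × List String))) (out : List String) : Decidable (Spec_find_common_tags2_8 articles out) := by unfold Spec_find_common_tags2_8; infer_instance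

-- ===== CLAIM (what is proved, stated in full; the proofs are below) =====
def Claim_equal_find_common_tags2_8 : Prop := ∀ (articles : List (List (String × List String))), Dom_find_common_tags2_8 articles → Pre_find_common_tags2_8 articles → Spec_find_common_tags2_8 articles (find_common_tags2_8 articles)

-- ===== LEMMAS AND PROOFS =====

-- the nested counting loop of B is the counting loop over the concatenation of the deduped tag lists
theorem pvFoldlFlatMap {α β γ : Type} (l : List α) (g : α → List β) (f : γ → β → γ) (init : γ) :
    l.foldl (fun acc a => (g a).foldl f acc) init = (l.flatMap g).foldl f init := by
  induction l generalizing init with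
  | nil => rfl
  | cons a l ih => simp [List.flatMap_cons, List.foldl_append, ih]

-- A's intersection loop is one filter by membership in every later article
theorem pvInterFold (l : List (List (String × List String))) (s : List String) :
    l.foldl (fun common article => PySem.Set.inter common (pvTags article)) s
      = s.filter (fun x => l.all (fun a => (pvTags a).contains x)) := by
  induction l generalizing s with
  | nil => simp
  | cons a l ih =>
      rw [List.foldl_cons, ih]
      simp only [PySem.Set.inter, PySem.Set.contains, List.filter_filter, List.all_cons]
      exact List.filter_congr (fun x _ => by rw [Bool.and_comm])

-- inserting further elements does not change a filter whose predicate forces membership in s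
theorem pvFilterUpdate (ys : List String) (s : List String) (Q : String → Bool)
    (h : ∀ k, Q k = true → k ∈ s) :
    (PySem.Set.update s ys).filter Q = s.filter Q := by
  induction ys generalizing s with
  | nil => rfl
  | cons y ys ih =>
      show (PySem.Set.update (PySem.Set.add s y) ys).filter Q = _
      by_cases hy : y ∈ s
      · rw [show PySem.Set.add s y = s from by simp [PySem.Set.add, PySem.Set.contains, hy]]
        exact ih s h
      · rw [show PySem.Set.add s y = s ++ [y] from by simp [PySem.Set.add, PySem.Set.contains, hy]]
        rw [ih (s ++ [y]) (fun k hk => List.mem_append.mpr (Or.inl (h k hk)))]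
        have hQy : Q y = false := by
          cases hQ : Q y with
          | false => rfl
          | true => exact absurd (h y hQ) hy
        simp [List.filter_append, hQy]

-- building a set from a duplicate-free list returns the list itself
theorem pvOfListNodup (s : List String) (h : s.Nodup) : PySem.Set.ofList s = s := by
  have key : ∀ (t acc : List String), t.Nodup → (∀ x ∈ t, x ∉ acc) →
      t.foldl PySem.Set.add acc = acc ++ t := by
    intro t
    induction t with
    | nil => simp
    | cons a t ih =>
        intro acc hnd hdisj
        simp only [List.foldl_cons, PySem.Set.add, PySem.Set.contains]
        rw [if_neg (fun hc => hdisj a (by simp) (List.contains_iff_mem.mp hc))]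
        rw [ih (acc ++ [a]) (List.Nodup.of_cons hnd) (fun x hx => by
          simp only [List.mem_append, List.mem_singleton]
          rintro (h1 | rfl)
          · exact hdisj x (by simp [hx]) h1
          · exact (List.nodup_cons.mp hnd).1 hx)]
        simp
  simpa using key s [] h (by simp)

-- a deduplicated list counts any element at most once
theorem pvDedupCountLe (t : List String) (k : String) : (PySem.List.dedup t).count k ≤ 1 := by
  rw [PySem.List.dedup_eq_ofList]
  exact List.nodup_iff_count_le_one.mp (PySem.Set.nodup_ofList _) k

-- the sum of the per-article 0/1 counts is at most the number of articles
theorem pvSumLe (l : List (List (String × List String))) (x : String) :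
    (l.map (fun a => (PySem.List.dedup (pvTags a)).count x)).sum ≤ l.length := by
  induction l with
  | nil => simp
  | cons a l ih =>
      have h1 := pvDedupCountLe (pvTags a) x
      simp only [List.map_cons, List.sum_cons, List.length_cons]
      omega

-- the per-article 0/1 counts sum to the number of articles iff every article contains x
theorem pvCountSum (l : List (List (String × List String))) (x : String) :
    ((l.map (fun a => (PySem.List.dedup (pvTags a)).count x)).sum = l.length)
      ↔ (∀ a ∈ l, (pvTags a).contains x = true) := by
  induction l with
  | nil => simp
  | cons a l ih =>
      have h1 := pvDedupCountLe (pvTags a) x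
      have hmem : (PySem.List.dedup (pvTags a)).count x = 1 ↔ (pvTags a).contains x = true := by
        rw [PySem.List.dedup_eq_ofList]
        constructor
        · intro hc
          have hx : x ∈ PySem.Set.ofList (pvTags a) := by
            rw [← List.count_pos_iff]; omega
          exact List.contains_iff_mem.mpr ((PySem.Set.mem_ofList _ _).mp hx)
        · intro hc
          exact List.count_eq_one_of_mem (PySem.Set.nodup_ofList _)
            ((PySem.Set.mem_ofList _ _).mpr (List.contains_iff_mem.mp hc))
      have hrest := pvSumLe l x
      simp only [List.map_cons, List.sum_cons, List.length_cons, List.forall_mem_cons]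
      constructor
      · intro hsum
        have hc1 : (PySem.List.dedup (pvTags a)).count x = 1 := by omega
        have hrs : (l.map (fun a => (PySem.List.dedup (pvTags a)).count x)).sum = l.length := by omega
        exact ⟨hmem.mp hc1, ih.mp hrs⟩
      · rintro ⟨ha, hall⟩
        have := ih.mpr hall
        have := hmem.mpr ha
        omega

theorem find_common_tags2_8_eq (articles : List (List (String × List String))) :
    find_common_tags2_8 articles = find_common_tags2_8_alt articles := by
  match articles with
  | [] => rfl
  | a0 :: rest =>
    set L := (a0 :: rest).flatMap (fun a => PySem.List.dedup (pvTags a)) with hL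
    have hlen : (a0 :: rest).length = rest.length + 1 := by simp
    -- B normal form
    have hB : find_common_tags2_8_alt (a0 :: rest)
        = (PySem.Set.ofList L).filter
            (fun k => ((L.count k : Int) == (((a0 :: rest).length : Nat) : Int))) := by
      show (let counts : PySem.Dict String Int :=
              (a0 :: rest).foldl
                (fun d article =>
                  (PySem.List.dedup (pvTags article)).foldl
                    (fun d t => d.modify t 0 (· + 1)) d)
                PySem.Dict.empty
            ((counts.items.filter (fun p => p.2 == (((a0 :: rest).length : Nat) : Int))).map Prod.fst)) = _
      rw [pvFoldlFlatMap, ← hL, ← PySem.Dict.counter_eq_foldl]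
      show ((((PySem.Dict.counter L).items.filter
        (fun p => p.2 == (((a0 :: rest).length : Nat) : Int))).map Prod.fst)) = _
      rw [PySem.Dict.items_counter, List.filter_map, List.map_map]
      simp [Function.comp_def]
    -- A normal form
    have hA : find_common_tags2_8 (a0 :: rest)
        = (PySem.Set.ofList (pvTags a0)).filter
            (fun x => rest.all (fun a => (pvTags a).contains x)) := by
      show rest.foldl (fun common article => PySem.Set.inter common (pvTags article))
            (PySem.Set.ofList (pvTags a0)) = _
      exact pvInterFold rest _
    have hLsplit : L = PySem.List.dedup (pvTags a0) ++ rest.flatMap (fun a => PySem.List.dedup (pvTags a)) := by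
      simp [hL, List.flatMap_cons]
    have hcount : ∀ k, L.count k = (PySem.List.dedup (pvTags a0)).count k
        + (rest.map (fun a => (PySem.List.dedup (pvTags a)).count k)).sum := by
      intro k
      rw [hLsplit, List.count_append, List.count_flatMap]
      simp [Function.comp_def]
    -- a tag counted in every article must occur in the first article
    have hQmem : ∀ k, ((L.count k : Int) == (((a0 :: rest).length : Nat) : Int)) = true →
        k ∈ PySem.List.dedup (pvTags a0) := by
      intro k hk
      have hkeq : L.count k = (a0 :: rest).length := by
        have := (beq_iff_eq).mp hk
        exact_mod_cast this
      have h1 := pvDedupCountLe (pvTags a0) k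
      have h2 := pvSumLe rest k
      have hc := hcount k
      rw [← List.count_pos_iff]
      omega
    -- normalise the set underlying B
    have hofd0 : PySem.Set.ofList (PySem.List.dedup (pvTags a0)) = PySem.List.dedup (pvTags a0) := by
      refine pvOfListNodup _ ?_
      rw [PySem.List.dedup_eq_ofList]
      exact PySem.Set.nodup_ofList _
    have hofL : PySem.Set.ofList L
        = PySem.Set.update (PySem.List.dedup (pvTags a0))
            (rest.flatMap (fun a => PySem.List.dedup (pvTags a))) := by
      rw [hLsplit]
      show List.foldl PySem.Set.add PySem.Set.empty _ = _
      rw [List.foldl_append]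
      show PySem.Set.update (PySem.Set.ofList (PySem.List.dedup (pvTags a0))) _ = _
      rw [hofd0]
    rw [hA, hB, hofL,
        pvFilterUpdate _ (PySem.List.dedup (pvTags a0)) _ hQmem,
        show PySem.List.dedup (pvTags a0) = PySem.Set.ofList (pvTags a0) from
          PySem.List.dedup_eq_ofList _]
    refine List.filter_congr ?_
    intro x hx
    have hx0 : x ∈ pvTags a0 := (PySem.Set.mem_ofList _ _).mp hx
    have hc1 : (PySem.List.dedup (pvTags a0)).count x = 1 := by
      rw [PySem.List.dedup_eq_ofList]
      exact List.count_eq_one_of_mem (PySem.Set.nodup_ofList _) ((PySem.Set.mem_ofList _ _).mpr hx0)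
    have hcx := hcount x
    have h2 := pvSumLe rest x
    rw [Bool.eq_iff_iff, beq_iff_eq]
    constructor
    · intro hall
      have hsum := (pvCountSum rest x).mpr (fun a ha => List.all_eq_true.mp hall a ha)
      have hL' : L.count x = (a0 :: rest).length := by omega
      exact_mod_cast hL'
    · intro hQ
      have hL' : L.count x = (a0 :: rest).length := by exact_mod_cast hQ
      have hsum : (rest.map (fun a => (PySem.List.dedup (pvTags a)).count x)).sum = rest.length := by
        omega
      exact List.all_eq_true.mpr (fun a ha => (pvCountSum rest x).mp hsum a ha)

-- ===== VERDICT (by name: the statement is the Claim_ definition above) =====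
theorem find_common_tags2_8_spec : Claim_equal_find_common_tags2_8 := by
  intro articles _ _
  show _ = _
  exact find_common_tags2_8_eq articles
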